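-- pv_equiv track=rewrite | github.com/lty455/xx | new/sentence.py | aggregate_time_segments
-- ===== SOURCE A (Python) =====
-- def aggregate_time_segments(timestamps, max_gap=1):
--     if not timestamps:
--         return []
--
--     timestamps = sorted(timestamps)
--     segments = []
--     start = timestamps[0]
--     end = timestamps[0]
--
--     for t in timestamps[1:]:
--         if t - end <= max_gap:
--             end = t
--         else:
--             segments.append((start, end))
--             start = t
--             end = t
--
--     segments.append((start, end))
--     return segments
-- ===== SOURCE B (Python) =====
-- def aggregate_time_segments(timestamps, max_gap=1):
--     s = sorted(timestamps)
--     if not s: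
--         return []
--     breaks = [(a, b) for a, b in zip(s, s[1:]) if b - a > max_gap]
--     starts = [s[0]] + [b for _, b in breaks]
--     ends = [a for a, _ in breaks] + [s[-1]]
--     return list(zip(starts, ends))
-- ===== Notes on version B (the rewrite author's own statement) =====
-- stated objective: alternative
-- what changed: B replaces A's stateful accumulate-or-flush loop with a staged, stateless pipeline: it pairs the sorted list with its shifted self to find the break gaps, derives the list of segment starts (first element plus each post-break element) and segment ends (each pre-break element plus the last) by comprehensions, and zips them.
import Mathlib
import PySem

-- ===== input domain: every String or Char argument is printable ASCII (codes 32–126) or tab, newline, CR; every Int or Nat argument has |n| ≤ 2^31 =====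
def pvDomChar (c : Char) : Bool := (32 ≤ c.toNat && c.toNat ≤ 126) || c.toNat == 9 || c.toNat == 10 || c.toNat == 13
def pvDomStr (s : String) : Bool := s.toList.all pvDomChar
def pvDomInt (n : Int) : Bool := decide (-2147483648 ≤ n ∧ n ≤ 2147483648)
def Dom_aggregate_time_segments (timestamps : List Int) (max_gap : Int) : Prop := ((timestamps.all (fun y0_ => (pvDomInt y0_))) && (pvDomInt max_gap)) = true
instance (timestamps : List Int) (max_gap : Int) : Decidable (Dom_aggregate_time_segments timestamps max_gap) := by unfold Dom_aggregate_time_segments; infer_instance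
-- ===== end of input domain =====

-- B replaces A's stateful flush loop with a stateless staged pipeline (break pairs → starts/ends → zip);
-- same cost, different decomposition (objective: alternative).

-- ===== PORT A =====
-- loop body of A: state = (segments, start, end)
def stepA (max_gap : Int) (acc : List (Int × Int) × Int × Int) (t : Int) : List (Int × Int) × Int × Int :=
  if t - acc.2.2 ≤ max_gap then (acc.1, acc.2.1, t)
  else (acc.1 ++ [(acc.2.1, acc.2.2)], t, t)

def aggregate_time_segments (timestamps : List Int) (max_gap : Int) : List (Int × Int) :=
  if timestamps = [] then []
  else
    match PySem.List.sorted timestamps (fun x => x) false with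
    | [] => []  -- unreachable: sorted of a nonempty list is nonempty
    | t0 :: rest =>     -- start = end = timestamps[0]; loop over timestamps[1:]
      let res := rest.foldl (stepA max_gap) ([], t0, t0)
      res.1 ++ [(res.2.1, res.2.2)]

-- ===== PORT B =====
-- breaks = adjacent pairs (a,b) of the sorted list with b - a > max_gap; starts = s[0] plus each b;
-- ends = each a plus s[-1]; result = zip starts ends.  (s[0]/s[-1] are in range: s is nonempty.)
def bsegs (max_gap : Int) (s : List Int) : List (Int × Int) :=
  let breaks := (s.zip (s.drop 1)).filter (fun p => p.2 - p.1 > max_gap)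
  let starts := s.headD 0 :: breaks.map Prod.snd
  let ends := breaks.map Prod.fst ++ [s.getLastD 0]
  starts.zip ends

def aggregate_time_segments_alt (timestamps : List Int) (max_gap : Int) : List (Int × Int) :=
  let s := PySem.List.sorted timestamps (fun x => x) false
  if s = [] then [] else bsegs max_gap s

-- ===== PRECONDITION & SPEC =====
def Spec_aggregate_time_segments (timestamps : List Int) (max_gap : Int) (out : List (Int × Int)) : Prop := out = aggregate_time_segments_alt timestamps max_gap
instance (timestamps : List Int) (max_gap : Int) (out : List (Int × Int)) : Decidable (Spec_aggregate_time_segments timestamps max_gap out) := by unfold Spec_aggregate_time_segments; infer_instance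

-- ===== CLAIM (what is proved, stated in full; the proofs are below) =====
def Claim_equal_aggregate_time_segments : Prop := ∀ (timestamps : List Int) (max_gap : Int), Dom_aggregate_time_segments timestamps max_gap → Spec_aggregate_time_segments timestamps max_gap (aggregate_time_segments timestamps max_gap)

-- ===== LEMMAS AND PROOFS =====

-- proof-only common recursion: the segments of the tail `l` given current run (s, e)
def chop (g : Int) : Int → Int → List Int → List (Int × Int)
  | s, e, [] => [(s, e)]
  | s, e, t :: ts => if t - e ≤ g then chop g s t ts else (s, e) :: chop g t t ts

theorem foldA_eq_chop (g : Int) :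
    ∀ (l : List Int) (acc : List (Int × Int)) (s e : Int),
      (let o := l.foldl (stepA g) (acc, s, e); o.1 ++ [(o.2.1, o.2.2)]) = acc ++ chop g s e l := by
  intro l
  induction l with
  | nil => intro acc s e; simp [chop]
  | cons t ts ih =>
    intro acc s e
    simp only [List.foldl_cons, stepA, chop]
    split_ifs with h
    · exact ih acc s t
    · rw [ih (acc ++ [(s, e)]) t t]; simp

-- the head's start is the only place the start argument appears
theorem chop_shape (g : Int) :
    ∀ (l : List Int) (a b e : Int), ∃ x t, chop g a e l = (a, x) :: t ∧ chop g b e l = (b, x) :: t := by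
  intro l
  induction l with
  | nil => intro a b e; exact ⟨e, [], rfl, rfl⟩
  | cons u us ih =>
    intro a b e
    by_cases h : u - e ≤ g
    · obtain ⟨x, t, h1, h2⟩ := ih a b u
      exact ⟨x, t, by simp [chop, h, h1], by simp [chop, h, h2]⟩
    · exact ⟨e, chop g u u us, by simp [chop, h], by simp [chop, h]⟩

theorem bsegs_eq_chop (g : Int) :
    ∀ (rest : List Int) (t0 : Int), bsegs g (t0 :: rest) = chop g t0 t0 rest := by
  intro rest
  induction rest with
  | nil => intro t0; simp [bsegs, chop]
  | cons t1 ts ih =>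
    intro t0
    have hpairs : ((t0 :: t1 :: ts).zip ((t0 :: t1 :: ts).drop 1))
        = (t0, t1) :: ((t1 :: ts).zip ((t1 :: ts).drop 1)) := by simp
    by_cases h : t1 - t0 ≤ g
    · -- no break between t0 and t1: B's first segment keeps start t0, end as for t1's run
      obtain ⟨x, t, h1, h2⟩ := chop_shape g ts t0 t1 t1
      have hIH : bsegs g (t1 :: ts) = (t1, x) :: t := by rw [ih t1, h2]
      have hch : chop g t0 t0 (t1 :: ts) = (t0, x) :: t := by
        simp [chop, h, h1]
      rw [hch]
      -- unfold B on both lists; the break pair (t0,t1) is filtered out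
      unfold bsegs at hIH ⊢
      simp only [hpairs, List.filter_cons] at *
      have hb : decide (t1 - t0 > g) = false := by simp; omega
      rw [hb]
      simp only [Bool.false_eq_true, if_false]
      -- the ends list is nonempty; destructure it to transport hIH's zip equation
      set F := ((t1 :: ts).zip ((t1 :: ts).drop 1)).filter (fun p => decide (p.2 - p.1 > g)) with hF
      have hL : (t0 :: t1 :: ts).getLastD 0 = (t1 :: ts).getLastD 0 := by simp
      cases hE : F.map Prod.fst ++ [(t1 :: ts).getLastD 0] with
      | nil => simp at hE
      | cons y E' =>
        simp only [hE, List.zip_cons_cons, List.cons.injEq] at hIH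
        simp only [hL, hE, List.zip_cons_cons]
        obtain ⟨hxy, htail⟩ := hIH
        have hy : y = x := by simpa using congrArg Prod.snd hxy
        rw [hy, htail]
        rfl
    · -- break: B emits (t0, t0) and then exactly B's answer for t1 :: ts
      have hch : chop g t0 t0 (t1 :: ts) = (t0, t0) :: chop g t1 t1 ts := by
        simp [chop, h]
      rw [hch, ← ih t1]
      unfold bsegs
      simp only [hpairs, List.filter_cons]
      have hb : decide (t1 - t0 > g) = true := by simp; omega
      rw [hb]
      simp

-- ===== VERDICT (by name: the statement is the Claim_ definition above) =====
theorem aggregate_time_segments_spec : Claim_equal_aggregate_time_segments := by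
  intro timestamps max_gap _
  unfold Spec_aggregate_time_segments aggregate_time_segments aggregate_time_segments_alt
  by_cases hts : timestamps = []
  · subst hts
    have : PySem.List.sorted ([] : List Int) (fun x => x) false = [] := by
      have := PySem.List.sorted_perm ([] : List Int) (fun x => x) false
      simpa using this.eq_nil
    simp [this]
  · have hne : PySem.List.sorted timestamps (fun x => x) false ≠ [] := by
      intro h
      have := PySem.List.sorted_perm timestamps (fun x => x) false
      rw [h] at this
      exact hts this.symm.eq_nil
    simp only [hts, ite_false]
    cases hs : PySem.List.sorted timestamps (fun x => x) false with
    | nil => exact absurd hs hne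
    | cons t0 rest =>
      simp only [if_neg (List.cons_ne_nil t0 rest)]
      rw [bsegs_eq_chop]
      exact foldA_eq_chop max_gap rest [] t0 t0
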